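-- pv_equiv track=rewrite | github.com/yuanchuzi2026/silicon-garden | brainstem/maintain_memory.py | truncate_content
-- ===== SOURCE A (Python) =====
-- MAX_BYTES = 25 * 1024  # 25KB
--
-- def truncate_content(lines, byte_limit=MAX_BYTES):
--     """在行数和字节数限制下截断，确保不在行中间切断"""
--     result = []
--     byte_count = 0
--     for line in lines:
--         line_bytes = len(line.encode('utf-8'))
--         if byte_count + line_bytes > byte_limit:
--             break
--         result.append(line)
--         byte_count += line_bytes
--     return result, byte_count
-- ===== SOURCE B (Python) =====
-- from itertools import accumulate
--
-- MAX_BYTES = 25 * 1024  # 25KB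
--
-- def truncate_content(lines, byte_limit=MAX_BYTES):
--     cums = list(accumulate(len(line.encode('utf-8')) for line in lines))
--     kept = [c for c in cums if c <= byte_limit]
--     k = len(kept)
--     return lines[:k], kept[-1] if kept else 0
-- ===== Notes on version B (the rewrite author's own statement) =====
-- stated objective: alternative
-- what changed: Replaces the greedy scan with early break by a precomputed cumulative-byte-sum table: keep the prefix sums that are <= byte_limit, slice the lines to that count and return the last kept prefix sum as the byte total.
import Mathlib
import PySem

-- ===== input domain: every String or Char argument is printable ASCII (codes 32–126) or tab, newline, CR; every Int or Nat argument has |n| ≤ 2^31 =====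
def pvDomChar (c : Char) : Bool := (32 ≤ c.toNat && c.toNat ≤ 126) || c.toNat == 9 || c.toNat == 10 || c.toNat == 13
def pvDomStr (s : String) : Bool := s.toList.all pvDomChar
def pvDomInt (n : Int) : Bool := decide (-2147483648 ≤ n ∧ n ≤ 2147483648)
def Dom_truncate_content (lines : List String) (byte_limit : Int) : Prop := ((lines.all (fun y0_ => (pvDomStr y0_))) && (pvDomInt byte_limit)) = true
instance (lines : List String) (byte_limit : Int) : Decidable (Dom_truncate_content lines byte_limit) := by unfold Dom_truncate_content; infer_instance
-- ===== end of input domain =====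

-- B replaces A's greedy early-break scan by a cumulative-sum table filtered against the limit; equivalence of RETURN values is proved (alternative decomposition, no speed claim).

-- ===== PORT A =====
-- len(line.encode('utf-8')): UTF-8 byte length of one character by codepoint range (exact for all of Unicode)
def pvUtf8CharLen (c : Char) : Int :=
  if c.toNat < 128 then 1 else if c.toNat < 2048 then 2 else if c.toNat < 65536 then 3 else 4

def pvUtf8Len (s : String) : Int := s.toList.foldl (fun a c => a + pvUtf8CharLen c) 0

-- the for-loop of A: result/byte_count accumulation with the early break
def pvTruncLoop (lines : List String) (byte_limit : Int) (byte_count : Int) : List String × Int :=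
  match lines with
  | [] => ([], byte_count)
  | line :: rest =>
    let line_bytes := pvUtf8Len line
    if byte_count + line_bytes > byte_limit then ([], byte_count)
    else
      let r := pvTruncLoop rest byte_limit (byte_count + line_bytes)
      (line :: r.1, r.2)

def truncate_content (lines : List String) (byte_limit : Int) : List String × Int :=
  pvTruncLoop lines byte_limit 0

-- ===== PORT B =====
-- itertools.accumulate of the per-line UTF-8 byte lengths, starting from acc
def pvAccum (acc : Int) : List Int → List Int
  | [] => []
  | x :: xs => (acc + x) :: pvAccum (acc + x) xs

def truncate_content_alt (lines : List String) (byte_limit : Int) : List String × Int :=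
  let cums := pvAccum 0 (lines.map pvUtf8Len)
  let kept := cums.filter (fun c => c ≤ byte_limit)
  let k := kept.length
  (lines.take k, (kept.getLast?).getD 0)

-- ===== PRECONDITION & SPEC =====
def Spec_truncate_content (lines : List String) (byte_limit : Int) (out : List String × Int) : Prop := out = truncate_content_alt lines byte_limit
instance (lines : List String) (byte_limit : Int) (out : List String × Int) : Decidable (Spec_truncate_content lines byte_limit out) := by unfold Spec_truncate_content; infer_instance

-- ===== CLAIM (what is proved, stated in full; the proofs are below) =====
def Claim_equal_truncate_content : Prop := ∀ (lines : List String) (byte_limit : Int), Dom_truncate_content lines byte_limit → Spec_truncate_content lines byte_limit (truncate_content lines byte_limit)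

-- ===== LEMMAS AND PROOFS =====

theorem pvUtf8CharLen_nonneg (c : Char) : 0 ≤ pvUtf8CharLen c := by
  unfold pvUtf8CharLen; split_ifs <;> norm_num

theorem pvUtf8Len_foldl_ge (cs : List Char) : ∀ a : Int, a ≤ cs.foldl (fun a c => a + pvUtf8CharLen c) a := by
  induction cs with
  | nil => intro a; simp
  | cons c cs ih =>
    intro a
    simp only [List.foldl]
    have h1 : a ≤ a + pvUtf8CharLen c := by have := pvUtf8CharLen_nonneg c; omega
    exact le_trans h1 (ih _)

theorem pvUtf8Len_nonneg (s : String) : 0 ≤ pvUtf8Len s := pvUtf8Len_foldl_ge s.toList 0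

-- every entry of pvAccum a (map pvUtf8Len ls) is ≥ a
theorem pvAccum_mem_ge (ls : List String) : ∀ (a c : Int), c ∈ pvAccum a (ls.map pvUtf8Len) → a ≤ c := by
  induction ls with
  | nil => intro a c h; simp [pvAccum] at h
  | cons l ls ih =>
    intro a c h
    simp only [List.map, pvAccum, List.mem_cons] at h
    have hl := pvUtf8Len_nonneg l
    rcases h with h | h
    · omega
    · have := ih (a + pvUtf8Len l) c h; omega

theorem pvTruncLoop_eq (byte_limit : Int) (lines : List String) :
    ∀ bc : Int,
      pvTruncLoop lines byte_limit bc =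
        (lines.take ((pvAccum bc (lines.map pvUtf8Len)).filter (fun c => c ≤ byte_limit)).length,
         (((pvAccum bc (lines.map pvUtf8Len)).filter (fun c => c ≤ byte_limit)).getLast?).getD bc) := by
  induction lines with
  | nil => intro bc; simp [pvTruncLoop, pvAccum]
  | cons l ls ih =>
    intro bc
    simp only [pvTruncLoop, List.map, pvAccum]
    by_cases h : bc + pvUtf8Len l > byte_limit
    · rw [if_pos h]
      have hfil : ((bc + pvUtf8Len l) :: pvAccum (bc + pvUtf8Len l) (ls.map pvUtf8Len)).filter
          (fun c => c ≤ byte_limit) = [] := by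
        rw [List.filter_eq_nil_iff]
        intro c hc
        simp only [List.mem_cons] at hc
        simp only [decide_eq_true_eq]
        rcases hc with rfl | hc
        · omega
        · have := pvAccum_mem_ge ls (bc + pvUtf8Len l) c hc; omega
      rw [hfil]; simp
    · rw [if_neg h]
      have hle : bc + pvUtf8Len l ≤ byte_limit := by omega
      have hfil : ((bc + pvUtf8Len l) :: pvAccum (bc + pvUtf8Len l) (ls.map pvUtf8Len)).filter
          (fun c => c ≤ byte_limit) =
          (bc + pvUtf8Len l) :: ((pvAccum (bc + pvUtf8Len l) (ls.map pvUtf8Len)).filter (fun c => c ≤ byte_limit)) := by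
        rw [List.filter_cons_of_pos]; simpa using hle
      rw [hfil, ih (bc + pvUtf8Len l)]
      simp only [Prod.mk.injEq]
      refine ⟨?_, ?_⟩
      · simp [List.take_succ_cons]
      · rcases hnil : (pvAccum (bc + pvUtf8Len l) (ls.map pvUtf8Len)).filter (fun c => c ≤ byte_limit) with _ | ⟨x, xs⟩
        · simp
        · simp [List.getLast?_cons]

-- ===== VERDICT (by name: the statement is the Claim_ definition above) =====
theorem truncate_content_spec : Claim_equal_truncate_content := by
  intro lines byte_limit _
  unfold Spec_truncate_content truncate_content truncate_content_alt
  exact pvTruncLoop_eq byte_limit lines 0
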